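-- pv_equiv track=rewrite | github.com/ExpressiveIntelligence/RCRTrainingSim | StoryAssemblerRedux/Utilities/frag_creator/gen_frag.py | split_task_call
-- ===== SOURCE A (Python) =====
-- def split_task_call(string_to_split):
--     # [this is a task] [another] -> ['[this is a task]', '[another]']
--     # however, [Text [task1] [task2]] -> ['[Text [task1] [task2]]']
--     tasks = []
--     current_task = ""
--     open_brackets = 0
--     for char in string_to_split:
--         if char == '[':
--             open_brackets += 1
--         if char == ']':
--             open_brackets -= 1
--         current_task += char
--         if open_brackets == 0:
--             tasks.append(current_task)
--             current_task = ""
--     return tasks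
-- ===== SOURCE B (Python) =====
-- def split_task_call(string_to_split):
--     # Pass 1: record every index at which the bracket balance returns to 0.
--     cuts = []
--     balance = 0
--     for i, char in enumerate(string_to_split):
--         balance += (char == '[') - (char == ']')
--         if balance == 0:
--             cuts.append(i)
--     # Pass 2: slice the original string between consecutive cut points.
--     out = []
--     start = 0
--     for end in cuts:
--         out.append(string_to_split[start:end + 1])
--         start = end + 1
--     return out
-- ===== Notes on version B (the rewrite author's own statement) =====
-- stated objective: alternative
-- what changed: Replaces A's accumulate-and-flush string building (growing current_task char by char and flushing it) by a cut-index table built in one balance-scan plus a second pass that slices the original string between consecutive cut points.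
import Mathlib
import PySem

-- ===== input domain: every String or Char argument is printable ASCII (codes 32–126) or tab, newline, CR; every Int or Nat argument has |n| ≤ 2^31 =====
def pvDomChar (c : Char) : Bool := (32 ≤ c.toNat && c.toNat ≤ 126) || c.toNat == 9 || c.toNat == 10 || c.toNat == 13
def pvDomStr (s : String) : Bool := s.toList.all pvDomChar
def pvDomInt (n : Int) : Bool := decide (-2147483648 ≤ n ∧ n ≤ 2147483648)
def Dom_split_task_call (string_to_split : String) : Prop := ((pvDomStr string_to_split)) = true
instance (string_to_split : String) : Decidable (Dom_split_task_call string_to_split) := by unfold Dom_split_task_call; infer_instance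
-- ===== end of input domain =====

-- B replaces A's accumulate-and-flush string building by a cut-index table plus a slicing pass (alternative decomposition, same cost).

-- ===== PORT A =====
-- the for-loop over the characters with state (tasks, current_task, open_brackets)
def pvALoop : List Char → List (List Char) → List Char → Int → List (List Char)
  | [], tasks, _cur, _ob => tasks
  | c :: rest, tasks, cur, ob =>
    let ob1 := if c = '[' then ob + 1 else ob
    let ob2 := if c = ']' then ob1 - 1 else ob1
    let cur1 := cur ++ [c]
    if ob2 = 0 then pvALoop rest (tasks ++ [cur1]) [] ob2
    else pvALoop rest tasks cur1 ob2

def split_task_call (string_to_split : String) : List String :=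
  (pvALoop string_to_split.toList [] [] 0).map String.mk

-- ===== PORT B =====
-- pass 1: indices at which the bracket balance returns to 0
def pvBCuts : List Char → Int → Nat → List Nat
  | [], _bal, _i => []
  | c :: rest, bal, i =>
    let bal1 := bal + ((if c = '[' then 1 else 0) - (if c = ']' then 1 else 0))
    if bal1 = 0 then i :: pvBCuts rest bal1 (i + 1)
    else pvBCuts rest bal1 (i + 1)

-- pass 2: for end in cuts: out.append(s[start:end+1]); start = end+1
def pvBSliceLoop (f : List Char) : List Nat → List (List Char) → Nat → List (List Char)
  | [], out, _start => out
  | e :: es, out, start =>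
    pvBSliceLoop f es (out ++ [PySem.List.slice f (some (start : Int)) (some ((e : Int) + 1))]) (e + 1)

def split_task_call_alt (string_to_split : String) : List String :=
  let chars := string_to_split.toList
  (pvBSliceLoop chars (pvBCuts chars 0 0) [] 0).map String.mk

-- ===== PRECONDITION & SPEC =====
def Spec_split_task_call (string_to_split : String) (out : List String) : Prop := out = split_task_call_alt string_to_split
instance (string_to_split : String) (out : List String) : Decidable (Spec_split_task_call string_to_split out) := by unfold Spec_split_task_call; infer_instance

-- ===== CLAIM (what is proved, stated in full; the proofs are below) =====
def Claim_equal_split_task_call : Prop := ∀ (string_to_split : String), Dom_split_task_call string_to_split → Spec_split_task_call string_to_split (split_task_call string_to_split)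

-- ===== LEMMAS AND PROOFS =====

theorem pvALoop_acc (l : List Char) : ∀ (tasks : List (List Char)) (cur : List Char) (ob : Int),
    pvALoop l tasks cur ob = tasks ++ pvALoop l [] cur ob := by
  induction l with
  | nil => intro tasks cur ob; simp [pvALoop]
  | cons c rest ih =>
    intro tasks cur ob
    simp only [pvALoop]
    split_ifs <;>
      first
        | (rw [ih (tasks ++ [cur ++ [c]]), ih ([] ++ [cur ++ [c]])]; simp)
        | (rw [ih tasks])

theorem pvBSliceLoop_acc (f : List Char) (es : List Nat) : ∀ (out : List (List Char)) (start : Nat),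
    pvBSliceLoop f es out start = out ++ pvBSliceLoop f es [] start := by
  induction es with
  | nil => intro out start; simp [pvBSliceLoop]
  | cons e es ih =>
    intro out start
    simp only [pvBSliceLoop]
    rw [ih (out ++ _), ih ([] ++ _)]; simp

theorem pv_main (l : List Char) : ∀ (bal : Int) (f : List Char) (start i : Nat) (cur : List Char),
    f.drop i = l → (f.take i).drop start = cur → start ≤ i →
    pvALoop l [] cur bal = pvBSliceLoop f (pvBCuts l bal i) [] start := by
  induction l with
  | nil => intro bal f start i cur _ _ _; simp [pvALoop, pvBCuts, pvBSliceLoop]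
  | cons c rest ih =>
    intro bal f start i cur hdrop hcur hsi
    -- f[i] = c and the suffix/prefix facts
    have hlen : i < f.length := by
      by_contra h
      have : f.drop i = [] := List.drop_eq_nil_of_le (by omega)
      rw [this] at hdrop; exact absurd hdrop (by simp)
    have hget : f[i]? = some c := by
      have h0 : (List.drop i f)[(0 : Nat)]? = f[i + 0]? := List.getElem?_drop
      rw [hdrop] at h0; simpa using h0.symm
    have htake : f.take (i + 1) = f.take i ++ [c] := by
      rw [List.take_add_one, hget]; rfl
    have htklen : (f.take i).length = i := by simp [hlen.le]
    have hcur1 : (f.take (i + 1)).drop start = cur ++ [c] := by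
      rw [htake, List.drop_append_of_le_length (by omega), hcur]
    have hdrop1 : f.drop (i + 1) = rest := by
      have : f.drop (i + 1) = (f.drop i).drop 1 := by rw [List.drop_drop]
      rw [this, hdrop]; rfl
    -- the two balance updates agree
    have hbal : (if c = ']' then (if c = '[' then bal + 1 else bal) - 1 else (if c = '[' then bal + 1 else bal))
        = bal + ((if c = '[' then 1 else 0) - (if c = ']' then 1 else 0)) := by
      by_cases h1 : c = '['
      · by_cases h2 : c = ']'
        · subst h1; exact absurd h2 (by decide)
        · simp [h1]
      · by_cases h2 : c = ']' <;> simp [h1, h2] <;> omega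
    simp only [pvALoop, pvBCuts, hbal]
    set bal1 := bal + ((if c = '[' then 1 else 0) - (if c = ']' then 1 else 0)) with hb
    split_ifs with h
    · -- flush: balance returned to 0 at index i
      rw [pvALoop_acc]
      have hslice : PySem.List.slice f (some (start : Int)) (some ((i : Int) + 1))
          = cur ++ [c] := by
        have : ((i : Int) + 1) = ((i + 1 : Nat) : Int) := by push_cast; ring
        rw [this, PySem.List.slice_natCast, ← List.drop_take, hcur1]
      have hIH := ih bal1 f (i + 1) (i + 1) [] hdrop1
        (List.drop_eq_nil_of_le (by simp)) (le_refl _)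
      rw [show pvBSliceLoop f (i :: pvBCuts rest bal1 (i + 1)) [] start
            = pvBSliceLoop f (pvBCuts rest bal1 (i + 1))
                ([] ++ [PySem.List.slice f (some (start : Int)) (some ((i : Int) + 1))]) (i + 1) from rfl]
      rw [pvBSliceLoop_acc, hslice, ← hIH]
    · exact ih bal1 f start (i + 1) (cur ++ [c]) hdrop1 hcur1 (by omega)

-- ===== VERDICT (by name: the statement is the Claim_ definition above) =====
theorem split_task_call_spec : Claim_equal_split_task_call := by
  intro s _
  unfold Spec_split_task_call split_task_call split_task_call_alt
  exact congrArg (List.map String.mk)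
    (pv_main s.toList 0 s.toList 0 0 [] rfl rfl (le_refl 0))
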